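-- pv_equiv track=rewrite | github.com/Developer-Mishra-Aayush/DSA | Searching & Sorting/prata_spoj.py | isMakable
-- ===== SOURCE A (Python) =====
-- def isPossible(cooks,totalParathas,mid):
--     tp = 0
--     for i in cooks:
--         totalTime = 0
--         position = 1
--         while (totalTime + position*i)<=mid and tp!=totalParathas:
--             totalTime = totalTime + position*i
--             position+=1
--             tp+=1
--             if tp==totalParathas:
--                 return True
--     return False
--
-- def isMakable(cooks,totalParathas):
--     cooks.sort()
--     start = 1
--     ans = -1
--     end = cooks[-1]*(totalParathas*(totalParathas+1)//2)
--     while start<=end: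
--         mid = start + (end - start)//2
--         if isPossible(cooks,totalParathas,mid):
--             end = mid -1
--             ans = mid
--         else:
--             start = mid + 1
--     return ans
-- ===== SOURCE B (Python) =====
-- from math import isqrt
--
-- def isMakable(cooks, totalParathas):
--     cs = sorted(cooks)
--
--     def feasible(mid):
--         # closed-form count of parathas cook i can finish by time mid:
--         # largest p with i*p*(p+1)/2 <= mid, via integer square root
--         done = 0
--         for i in cs:
--             if i <= 0:
--                 return True  # a non-positive rank cook finishes any number by time mid >= 1
--             q = (2 * mid) // i
--             done += (isqrt(4 * q + 1) - 1) // 2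
--             if done >= totalParathas:
--                 return True
--         return False
--
--     lo = 1
--     hi = cs[-1] * (totalParathas * (totalParathas + 1) // 2)
--     ans = -1
--     while lo <= hi:
--         mid = (lo + hi) // 2
--         if feasible(mid):
--             ans = mid
--             hi = mid - 1
--         else:
--             lo = mid + 1
--     return ans
-- ===== Notes on version B (the rewrite author's own statement) =====
-- stated objective: faster
-- what changed: The feasibility test inside the binary search counts each cook's parathas in O(1) with a closed-form inverse-triangular formula via math.isqrt, instead of A's incremental while-loop that simulates every paratha one by one.
-- outside the precondition, e.g. on isMakable([], 1): A raises IndexError, B raises IndexError; on isMakable([2], -2): A returns -1, B returns 1; on isMakable([-1, 2], -2): A does not finish within the time limit, B returns 1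
import Mathlib
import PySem

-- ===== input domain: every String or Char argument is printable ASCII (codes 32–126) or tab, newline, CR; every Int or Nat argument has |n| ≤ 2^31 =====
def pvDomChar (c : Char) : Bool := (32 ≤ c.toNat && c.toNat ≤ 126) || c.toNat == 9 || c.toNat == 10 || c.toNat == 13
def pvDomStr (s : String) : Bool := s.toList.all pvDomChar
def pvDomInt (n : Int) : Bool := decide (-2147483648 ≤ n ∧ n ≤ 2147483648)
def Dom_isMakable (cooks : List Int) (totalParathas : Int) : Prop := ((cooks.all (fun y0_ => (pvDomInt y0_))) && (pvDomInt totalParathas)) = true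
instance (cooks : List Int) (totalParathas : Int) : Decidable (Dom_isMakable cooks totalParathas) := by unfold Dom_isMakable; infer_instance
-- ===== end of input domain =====

-- B replaces A's per-cook incremental while-loop feasibility test by a closed-form
-- paratha count via integer square root (objective: faster). Equivalence is about the
-- return value only: Python A sorts `cooks` in place, B leaves it untouched.

-- ===== PORT A =====
-- inner `while` of isPossible; fuel bounds the iterations (each iteration increments
-- tp and the loop returns at tp == totalParathas, so (totalParathas - tp) + 1 suffices)
def pvInnerA (i mid totalParathas : Int) : Nat → Int → Int → Int → Int × Bool
  | 0, _, _, tp => (tp, false)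
  | fuel+1, totalTime, position, tp =>
    if totalTime + position * i ≤ mid ∧ tp ≠ totalParathas then
      let totalTime' := totalTime + position * i
      let position' := position + 1
      let tp' := tp + 1
      if tp' = totalParathas then (tp', true)
      else pvInnerA i mid totalParathas fuel totalTime' position' tp'
    else (tp, false)

-- the `for i in cooks` loop of isPossible, carrying tp across cooks
def pvPossGoA (totalParathas mid : Int) : List Int → Int → Bool
  | [], _ => false
  | i :: rest, tp =>
    let r := pvInnerA i mid totalParathas ((totalParathas - tp).toNat + 1) 0 1 tp
    if r.2 then true else pvPossGoA totalParathas mid rest r.1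

def pvIsPossibleA (cooks : List Int) (totalParathas mid : Int) : Bool :=
  pvPossGoA totalParathas mid cooks 0

-- the binary-search `while start <= end` loop; fuel bounds the iterations
-- (the interval [start, end] shrinks strictly each round)
def pvSearchA (cooks : List Int) (totalParathas : Int) : Nat → Int → Int → Int → Int
  | 0, _, _, ans => ans
  | fuel+1, start, end_, ans =>
    if start ≤ end_ then
      let mid := start + PySem.Int.floordiv (end_ - start) 2
      if pvIsPossibleA cooks totalParathas mid then
        pvSearchA cooks totalParathas fuel start (mid - 1) mid
      else
        pvSearchA cooks totalParathas fuel (mid + 1) end_ ans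
    else ans

def isMakable (cooks : List Int) (totalParathas : Int) : Int :=
  let sortedCooks := PySem.List.sorted cooks (fun x => x) false
  -- cooks[-1]: Pre_ requires cooks ≠ [], so the index is in range and the default unreachable
  let last := PySem.List.pyGetD sortedCooks (-1) 0
  let end_ := last * (PySem.Int.floordiv (totalParathas * (totalParathas + 1)) 2)
  pvSearchA sortedCooks totalParathas (end_ + 1).toNat 1 end_ (-1)

-- ===== PORT B =====
-- feasible(mid) of Source B: closed-form count per cook via integer square root
-- (math.isqrt on a nonnegative argument is Int.sqrt)
def pvFeasGoB (totalParathas mid : Int) : List Int → Int → Bool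
  | [], _ => false
  | i :: rest, done =>
    if i ≤ 0 then true
    else
      let q := PySem.Int.floordiv (2 * mid) i
      let done' := done + PySem.Int.floordiv (Int.sqrt (4 * q + 1) - 1) 2
      if totalParathas ≤ done' then true else pvFeasGoB totalParathas mid rest done'

def pvFeasibleB (cs : List Int) (totalParathas mid : Int) : Bool :=
  pvFeasGoB totalParathas mid cs 0

-- the `while lo <= hi` loop of Source B; same fuel bound as A's loop
def pvSearchB (cs : List Int) (totalParathas : Int) : Nat → Int → Int → Int → Int
  | 0, _, _, ans => ans
  | fuel+1, lo, hi, ans =>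
    if lo ≤ hi then
      let mid := PySem.Int.floordiv (lo + hi) 2
      if pvFeasibleB cs totalParathas mid then
        pvSearchB cs totalParathas fuel lo (mid - 1) mid
      else
        pvSearchB cs totalParathas fuel (mid + 1) hi ans
    else ans

def isMakable_alt (cooks : List Int) (totalParathas : Int) : Int :=
  let cs := PySem.List.sorted cooks (fun x => x) false
  let hi := (PySem.List.pyGetD cs (-1) 0) * (PySem.Int.floordiv (totalParathas * (totalParathas + 1)) 2)
  pvSearchB cs totalParathas (hi + 1).toNat 1 hi (-1)

-- ===== PRECONDITION & SPEC =====
-- Pre_ excludes empty cooks (A raises IndexError on cooks[-1]) and negative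
-- totalParathas, outside the problem's domain, where A diverges whenever a
-- non-positive cook rank is present and otherwise returns -1 only because its
-- tp == totalParathas counter check can never fire.
def Pre_isMakable (cooks : List Int) (totalParathas : Int) : Prop :=
  cooks ≠ [] ∧ 0 ≤ totalParathas
instance (cooks : List Int) (totalParathas : Int) : Decidable (Pre_isMakable cooks totalParathas) := by
  unfold Pre_isMakable; infer_instance

def pvWitness_isMakable : List Int × Int := ([3, 1], 4)

def Spec_isMakable (cooks : List Int) (totalParathas : Int) (out : Int) : Prop := out = isMakable_alt cooks totalParathas
instance (cooks : List Int) (totalParathas : Int) (out : Int) : Decidable (Spec_isMakable cooks totalParathas out) := by unfold Spec_isMakable; infer_instance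

-- ===== CLAIM (what is proved, stated in full; the proofs are below) =====
def Claim_equal_isMakable : Prop := ∀ (cooks : List Int) (totalParathas : Int), Dom_isMakable cooks totalParathas → Pre_isMakable cooks totalParathas → Spec_isMakable cooks totalParathas (isMakable cooks totalParathas)

-- ===== LEMMAS AND PROOFS =====

-- Python's two midpoint formulas agree: start + (end-start)//2 = (start+end)//2
lemma pv_mid_eq (lo hi : Int) :
    lo + PySem.Int.floordiv (hi - lo) 2 = PySem.Int.floordiv (lo + hi) 2 := by
  rw [PySem.Int.floordiv_eq_ediv_of_pos (by norm_num), PySem.Int.floordiv_eq_ediv_of_pos (by norm_num)]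
  omega

-- the closed-form count c = (isqrt(4q+1)-1)//2 is the largest p ≥ 0 with p(p+1) ≤ q
lemma pv_cap_spec (q : Int) (hq : 0 ≤ q) :
    0 ≤ PySem.Int.floordiv (Int.sqrt (4 * q + 1) - 1) 2 ∧
    (PySem.Int.floordiv (Int.sqrt (4 * q + 1) - 1) 2) * (PySem.Int.floordiv (Int.sqrt (4 * q + 1) - 1) 2 + 1) ≤ q ∧
    q < (PySem.Int.floordiv (Int.sqrt (4 * q + 1) - 1) 2 + 1) * (PySem.Int.floordiv (Int.sqrt (4 * q + 1) - 1) 2 + 2) := by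
  set z : Int := 4 * q + 1 with hz
  have hz0 : 0 ≤ z := by omega
  set s : Int := Int.sqrt z with hs
  have hs0 : 0 ≤ s := Int.sqrt_nonneg z
  have hseq : s = (Nat.sqrt z.toNat : Int) := by simp [hs, Int.sqrt]
  have hsq : s * s ≤ z := by
    have h : ((Nat.sqrt z.toNat : Int)) ^ 2 ≤ (z.toNat : Int) := by
      exact_mod_cast Nat.sqrt_le' z.toNat
    rw [Int.toNat_of_nonneg hz0] at h
    rw [hseq]; nlinarith
  have hlt : z < (s + 1) * (s + 1) := by
    have h : ((z.toNat : Int)) < ((Nat.sqrt z.toNat : Int) + 1) ^ 2 := by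
      exact_mod_cast Nat.lt_succ_sqrt' z.toNat
    rw [Int.toNat_of_nonneg hz0] at h
    rw [hseq]; nlinarith
  have hs1 : 1 ≤ s := by
    by_contra h
    have : s = 0 := by omega
    rw [this] at hlt
    omega
  rw [PySem.Int.floordiv_eq_ediv_of_pos (by norm_num)]
  set c : Int := (s - 1) / 2 with hc
  have hcs : s = 2 * c + 1 ∨ s = 2 * c + 2 := by omega
  have hc0 : 0 ≤ c := by omega
  refine ⟨hc0, ?_, ?_⟩
  · -- c(c+1) ≤ q from (2c+1)² ≤ s² ≤ 4q+1
    have h1 : (2 * c + 1) * (2 * c + 1) ≤ s * s := by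
      rcases hcs with h | h <;> nlinarith
    nlinarith
  · -- q < (c+1)(c+2) from 4q+1 < (s+1)² ≤ (2c+3)²
    have h2 : (s + 1) * (s + 1) ≤ (2 * c + 3) * (2 * c + 3) := by
      rcases hcs with h | h <;> nlinarith
    nlinarith

-- A's inner while-loop with a non-positive cook: the time test always passes, so the
-- loop counts up to totalParathas and returns True
lemma pv_innerA_nonpos (i mid tP : Int) (hi : i ≤ 0) (hmid : 0 ≤ mid) :
    ∀ (fuel : Nat) (T pos tp : Int), T ≤ 0 → 1 ≤ pos → tp < tP → (tP - tp).toNat ≤ fuel →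
    pvInnerA i mid tP fuel T pos tp = (tP, true) := by
  intro fuel
  induction fuel with
  | zero => intro T pos tp hT hpos htp hf; omega
  | succ f ih =>
    intro T pos tp hT hpos htp hf
    have hmul : pos * i ≤ 0 := mul_nonpos_of_nonneg_of_nonpos (by omega) hi
    have hcond : T + pos * i ≤ mid ∧ tp ≠ tP := ⟨by omega, by omega⟩
    simp only [pvInnerA, if_pos hcond]
    by_cases h : tp + 1 = tP
    · simp [h]
    · simp only [if_neg h]
      exact ih (T + pos * i) (pos + 1) (tp + 1) (by omega) (by omega) (by omega) (by omega)

-- A's inner while-loop with a positive cook, characterised by the cap c: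
-- starting at position k+1 with elapsed time i*t (2t = k(k+1)), tp < tP, it either
-- reaches tP (when tP - tp ≤ c - k) or stops with tp + (c - k) parathas made
lemma pv_innerA_pos (i mid tP c : Int) (hi : 1 ≤ i)
    (hcap : ∀ p : Int, 0 ≤ p → (i * (p * (p + 1)) ≤ 2 * mid ↔ p ≤ c)) :
    ∀ (fuel : Nat) (k : Nat) (t tp : Int), 2 * t = (k : Int) * ((k : Int) + 1) → (k : Int) ≤ c →
    tp < tP → (tP - tp).toNat ≤ fuel →
    pvInnerA i mid tP fuel (i * t) ((k : Int) + 1) tp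
      = if tP - tp ≤ c - (k : Int) then (tP, true) else (tp + (c - (k : Int)), false) := by
  intro fuel
  induction fuel with
  | zero => intro k t tp h2t hk htp hf; omega
  | succ f ih =>
    intro k t tp h2t hk htp hf
    have hstep : i * t + ((k : Int) + 1) * i ≤ mid ↔ ((k : Int) + 1) ≤ c := by
      have := hcap ((k : Int) + 1) (by positivity)
      constructor
      · intro h; exact this.mp (by nlinarith)
      · intro h
        have := this.mpr h
        nlinarith
    by_cases hkc : ((k : Int) + 1) ≤ c
    · have hcond : i * t + ((k : Int) + 1) * i ≤ mid ∧ tp ≠ tP := ⟨hstep.mpr hkc, by omega⟩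
      simp only [pvInnerA, if_pos hcond]
      by_cases h : tp + 1 = tP
      · simp only [if_pos h]
        rw [if_pos (by omega)]
        simp [h]
      · simp only [if_neg h]
        have harg : i * t + ((k : Int) + 1) * i = i * (t + ((k : Int) + 1)) := by ring
        have hpos : (k : Int) + 1 + 1 = ((k + 1 : Nat) : Int) + 1 := by push_cast; ring
        rw [harg, hpos]
        rw [ih (k + 1) (t + ((k : Int) + 1)) (tp + 1) (by push_cast; linear_combination h2t)
          (by push_cast; omega) (by omega) (by omega)]
        push_cast
        split_ifs with h1 h2 h2 <;> first
          | rfl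
          | (exfalso; omega)
          | (congr 1; omega)
    · have hcond : ¬ (i * t + ((k : Int) + 1) * i ≤ mid ∧ tp ≠ tP) := by
        intro h; exact hkc (hstep.mp h.1)
      simp only [pvInnerA, if_neg hcond]
      rw [if_neg (by omega)]
      congr 1
      omega

-- the two feasibility tests agree (any cook list, shared running counter)
lemma pv_feas_eq (tP mid : Int) (htP : 1 ≤ tP) (hmid : 1 ≤ mid) :
    ∀ (cs : List Int) (tp : Int), 0 ≤ tp → tp < tP →
    pvPossGoA tP mid cs tp = pvFeasGoB tP mid cs tp := by
  intro cs
  induction cs with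
  | nil => intro tp _ _; rfl
  | cons i rest ih =>
    intro tp htp0 htp
    by_cases hi : i ≤ 0
    · simp only [pvPossGoA, pvFeasGoB, if_pos hi]
      rw [pv_innerA_nonpos i mid tP hi (by omega) _ 0 1 tp (by omega) (by omega) htp (by omega)]
      simp
    · have hi' : 0 < i := by omega
      simp only [pvPossGoA, pvFeasGoB, if_neg hi]
      have hq0 : 0 ≤ PySem.Int.floordiv (2 * mid) i := by
        rw [PySem.Int.floordiv_eq_ediv_of_pos hi']; positivity
      obtain ⟨hc0, hcl, hcr⟩ := pv_cap_spec _ hq0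
      generalize hcdef : PySem.Int.floordiv (Int.sqrt (4 * PySem.Int.floordiv (2 * mid) i + 1) - 1) 2 = c at hc0 hcl hcr ⊢
      have hcap : ∀ p : Int, 0 ≤ p → (i * (p * (p + 1)) ≤ 2 * mid ↔ p ≤ c) := by
        intro p hp
        have hbr : p * (p + 1) ≤ PySem.Int.floordiv (2 * mid) i ↔ p * (p + 1) * i ≤ 2 * mid :=
          PySem.Int.le_floordiv_iff_mul_le (a := 2 * mid) (b := i) (q := p * (p + 1)) hi'
        constructor
        · intro h
          have h1 : p * (p + 1) ≤ PySem.Int.floordiv (2 * mid) i := hbr.mpr (by nlinarith [h])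
          by_contra hpc
          have hcp : c + 1 ≤ p := by omega
          nlinarith
        · intro h
          have h1 : p * (p + 1) ≤ c * (c + 1) := by nlinarith
          have h2 : p * (p + 1) * i ≤ 2 * mid := hbr.mp (h1.trans hcl)
          rw [mul_comm]; exact h2
      have hinner := pv_innerA_pos i mid tP c hi' hcap ((tP - tp).toNat + 1) 0 0 tp
        (by norm_num) (by push_cast; omega) htp (by omega)
      push_cast at hinner
      rw [mul_zero] at hinner
      simp only [sub_zero] at hinner
      rw [hinner]
      by_cases hdone : tP ≤ tp + c
      · have h2 : tP - tp ≤ c := by omega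
        rw [if_pos h2]
        simp [hdone]
      · have h2 : ¬ tP - tp ≤ c := by omega
        rw [if_neg h2, if_neg hdone]
        simpa using ih (tp + c) (by omega) (by omega)

-- the two binary-search loops agree when the feasibility tests agree on mids ≥ 1
lemma pv_search_eq (csA csB : List Int) (tP : Int)
    (hfeas : ∀ m : Int, 1 ≤ m → pvIsPossibleA csA tP m = pvFeasibleB csB tP m) :
    ∀ (fuel : Nat) (lo hi ans : Int), 1 ≤ lo →
    pvSearchA csA tP fuel lo hi ans = pvSearchB csB tP fuel lo hi ans := by
  intro fuel
  induction fuel with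
  | zero => intro lo hi ans _; rfl
  | succ f ih =>
    intro lo hi ans hlo
    simp only [pvSearchA, pvSearchB]
    by_cases h : lo ≤ hi
    · simp only [if_pos h]
      rw [pv_mid_eq lo hi]
      have hmid := PySem.Int.floordiv_two_mid_bounds h
      rw [hfeas _ (by omega)]
      by_cases hp : pvFeasibleB csB tP (PySem.Int.floordiv (lo + hi) 2)
      · rw [if_pos hp, if_pos hp]
        exact ih lo _ _ hlo
      · rw [if_neg hp, if_neg hp]
        exact ih _ hi ans (by omega)
    · simp [if_neg h]

-- ===== VERDICT (by name: the statement is the Claim_ definition above) =====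
theorem isMakable_spec : Claim_equal_isMakable := by
  intro cooks totalParathas _ hpre
  obtain ⟨-, htP⟩ := hpre
  simp only [Spec_isMakable, isMakable, isMakable_alt]
  rcases eq_or_lt_of_le htP with h0 | h1
  · -- totalParathas = 0: the search interval [1, 0] is empty on both sides
    rw [← h0]
    norm_num [PySem.Int.floordiv, pvSearchA, pvSearchB]
  · exact pv_search_eq _ _ totalParathas
      (fun m hm => pv_feas_eq totalParathas m (by omega) hm _ 0 le_rfl (by omega))
      _ 1 _ (-1) le_rfl
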